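-- pv_equiv track=rewrite | github.com/keon/algorithms | algorithms/stack/switch_pairs.py | second_switch_pairs
-- ===== SOURCE A (Python) =====
-- import collections
--
-- def second_switch_pairs(stack):
--     q = collections.deque()
--     # Put all values into queue from stack
--     for i in range(len(stack)):
--         q.append(stack.pop())
--     # Put values back into stack from queue
--     for i in range(len(q)):
--         stack.append(q.pop())
--     # Now, stack is reverse, put all values into queue from stack
--     for i in range(len(stack)):
--         q.append(stack.pop())
--     # Swap pairs by appending the 2nd value before appending 1st value
--     for i in range(len(q)):
--         if len(q) == 0:
--             break
--         first = q.pop()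
--         if len(q) == 0:                 # case: odd number of values in stack
--             stack.append(first)
--             break
--         second = q.pop()
--         stack.append(second)
--         stack.append(first)
--
--     return stack
-- ===== SOURCE B (Python) =====
-- def second_switch_pairs(stack):
--     swapped = []
--     i = 0
--     while i + 1 < len(stack):
--         swapped.append(stack[i + 1])
--         swapped.append(stack[i])
--         i += 2
--     if i < len(stack):          # odd length: last element stays
--         swapped.append(stack[i])
--     stack[:] = swapped
--     return stack
-- ===== Notes on version B (the rewrite author's own statement) =====
-- stated objective: simpler
-- what changed: Replaced A's four deque/stack transfer loops with a single index pass that builds the pairwise-swapped list directly; no auxiliary queue is maintained.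
import Mathlib
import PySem

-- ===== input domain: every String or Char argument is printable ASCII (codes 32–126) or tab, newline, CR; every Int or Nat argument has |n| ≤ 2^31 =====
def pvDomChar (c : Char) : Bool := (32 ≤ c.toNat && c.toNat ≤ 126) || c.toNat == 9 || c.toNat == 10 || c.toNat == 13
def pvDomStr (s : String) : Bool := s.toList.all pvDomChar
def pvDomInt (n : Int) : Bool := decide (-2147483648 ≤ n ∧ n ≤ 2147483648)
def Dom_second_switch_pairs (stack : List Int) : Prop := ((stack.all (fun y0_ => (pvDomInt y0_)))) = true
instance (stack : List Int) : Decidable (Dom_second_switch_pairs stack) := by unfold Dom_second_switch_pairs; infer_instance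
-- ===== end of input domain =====

-- B replaces A's four deque/stack transfer loops with a single index-pass pairwise swap (objective: simpler); equivalence is about the returned list (both mutate the argument in place).



-- ===== PORT A =====
-- A moves all values stack→deque, back deque→stack, stack→deque again, then pops
-- pairs from the deque appending second-before-first.  Each transfer loop runs
-- until its source is empty (range(len(...)) iterations, one pop each), ported as
-- popAll; the final pair loop with its two emptiness checks / breaks is pairLoop.
-- Note: the Python mutates `stack` in place and returns it; both B and this proof
-- concern the returned list (B performs the same in-place update via stack[:]=).
def popAll (src dst : List Int) : List Int :=
  if h : src = [] then dst
  else popAll src.dropLast (dst ++ [src.getLast h])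
termination_by src.length
decreasing_by
  cases src with
  | nil => exact absurd rfl h
  | cons a t => simp [List.length_dropLast]

def pairLoop (q stack : List Int) : List Int :=
  if hq : q = [] then stack                            -- len(q) == 0: break
  else
    let first := q.getLast hq
    if hq2 : q.dropLast = [] then stack ++ [first]     -- odd leftover: append, break
    else pairLoop q.dropLast.dropLast (stack ++ [q.dropLast.getLast hq2, first])
termination_by q.length
decreasing_by
  cases q with
  | nil => exact absurd rfl hq
  | cons a t =>
    have : (a :: t).dropLast.dropLast.length ≤ t.length := by
      simp [List.length_dropLast]
    simpa using Nat.lt_succ_of_le this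

def second_switch_pairs (stack : List Int) : List Int :=
  let q := popAll stack []
  let stack1 := popAll q []
  let q2 := popAll stack1 []
  pairLoop q2 []

-- ===== PORT B =====
-- B: one index pass (while i+1 < len) appending each pair swapped, odd leftover
-- appended unchanged; the result is written back into stack and returned.
def buildSwap (stack swapped : List Int) (i : Nat) : List Int :=
  if i + 1 < stack.length then
    buildSwap stack (swapped ++ [stack.getD (i + 1) 0, stack.getD i 0]) (i + 2)
  else if i < stack.length then swapped ++ [stack.getD i 0]
  else swapped
termination_by stack.length - i

def second_switch_pairs_alt (stack : List Int) : List Int := buildSwap stack [] 0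

-- ===== PRECONDITION & SPEC =====
def Spec_second_switch_pairs (stack : List Int) (out : List Int) : Prop := out = second_switch_pairs_alt stack
instance (stack : List Int) (out : List Int) : Decidable (Spec_second_switch_pairs stack out) := by unfold Spec_second_switch_pairs; infer_instance

-- ===== CLAIM =====
def Claim_equal_second_switch_pairs : Prop := ∀ (stack : List Int), Dom_second_switch_pairs stack → Spec_second_switch_pairs stack (second_switch_pairs stack)

-- ===== LEMMAS AND PROOFS =====
-- proof-side intermediary: the pairwise-swap of a list, structurally
def swapHelper : List Int → List Int
  | a :: b :: rest => b :: a :: swapHelper rest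
  | xs => xs

theorem buildSwap_eq (stack swapped : List Int) (i : Nat) :
    buildSwap stack swapped i = swapped ++ swapHelper (stack.drop i) := by
  induction swapped, i using buildSwap.induct stack with
  | case1 swapped i h ih =>
    have hi : i < stack.length := by omega
    have e1 : stack.drop i = stack[i] :: stack.drop (i + 1) :=
      List.drop_eq_getElem_cons hi
    have e2 : stack.drop (i + 1) = stack[i + 1] :: stack.drop (i + 2) :=
      List.drop_eq_getElem_cons h
    rw [buildSwap, if_pos h, ih, e1, e2, swapHelper]
    simp [List.getD_eq_getElem?_getD, List.getElem?_eq_getElem hi, List.getElem?_eq_getElem h]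
  | case2 swapped i h h2 =>
    have e1 : stack.drop i = stack[i] :: stack.drop (i + 1) :=
      List.drop_eq_getElem_cons h2
    have e2 : stack.drop (i + 1) = [] := List.drop_eq_nil_of_le (by omega)
    rw [buildSwap, if_neg h, if_pos h2, e1, e2]
    simp [swapHelper, List.getD_eq_getElem?_getD, List.getElem?_eq_getElem h2]
  | case3 swapped i h h2 =>
    have e1 : stack.drop i = [] := List.drop_eq_nil_of_le (by omega)
    rw [buildSwap, if_neg h, if_neg h2, e1]
    simp [swapHelper]

theorem popAll_eq (src dst : List Int) : popAll src dst = dst ++ src.reverse := by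
  induction src using List.reverseRecOn generalizing dst with
  | nil => simp [popAll]
  | append_singleton l a ih =>
    rw [popAll]
    simp [ih]

theorem pairLoop_rev (xs acc : List Int) : pairLoop xs.reverse acc = acc ++ swapHelper xs := by
  induction xs using swapHelper.induct generalizing acc with
  | case1 a b rest ih =>
    rw [pairLoop]
    have e1 : (a :: b :: rest).reverse = (rest.reverse ++ [b]) ++ [a] := by simp
    simp only [e1, List.dropLast_concat, List.getLast_concat, ih, swapHelper]
    simp
  | case2 xs hxs =>
    match xs, hxs with
    | [], _ => simp [pairLoop, swapHelper]
    | [a], _ => simp [pairLoop, swapHelper]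
    | a :: b :: rest, h => exact (h a b rest rfl).elim

-- ===== VERDICT =====
theorem second_switch_pairs_spec : Claim_equal_second_switch_pairs := by
  intro stack _
  unfold Spec_second_switch_pairs second_switch_pairs second_switch_pairs_alt
  simp only [popAll_eq, List.nil_append, List.reverse_reverse, buildSwap_eq, List.drop_zero]
  simpa using pairLoop_rev stack []
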